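-- pv_equiv track=rewrite | github.com/guitargnarr/RetailMyMeds | Pharmacy_Database/Build/download_partd_prescribers.py | _is_glp1
-- ===== SOURCE A (Python) =====
-- GLP1_GENERICS = {
--     'semaglutide', 'tirzepatide', 'liraglutide',
--     'dulaglutide', 'exenatide',
-- }
--
-- GLP1_BRANDS_UPPER = {
--     'OZEMPIC', 'WEGOVY', 'RYBELSUS',
--     'MOUNJARO', 'ZEPBOUND',
--     'VICTOZA', 'SAXENDA',
--     'TRULICITY',
--     'BYETTA', 'BYDUREON',
-- }
--
-- def _is_glp1(gnrc_name: str, brnd_name: str) -> bool: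
--     """Fast check if a record is a GLP-1 drug."""
--     gn = gnrc_name.strip().lower()
--     for drug in GLP1_GENERICS:
--         if drug in gn:
--             return True
--     bn = brnd_name.strip().upper()
--     for brand in GLP1_BRANDS_UPPER:
--         if brand in bn:
--             return True
--     return False
-- ===== SOURCE B (Python) =====
-- _GLP1_GENERICS = ('semaglutide', 'tirzepatide', 'liraglutide',
--                   'dulaglutide', 'exenatide')
--
-- _GLP1_BRANDS = ('ozempic', 'wegovy', 'rybelsus', 'mounjaro', 'zepbound',
--                 'victoza', 'saxenda', 'trulicity', 'byetta', 'bydureon')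
--
--
-- def _index_by_first(words):
--     """First-letter index: maps an initial character to the names starting with it."""
--     idx = {}
--     for w in words:
--         idx[w[0]] = idx.get(w[0], []) + [w]
--     return idx
--
--
-- _GEN_IDX = _index_by_first(_GLP1_GENERICS)
-- _BRAND_IDX = _index_by_first(_GLP1_BRANDS)
--
--
-- def _scan(idx, text):
--     """One pass over the case-folded text: at each position only the names whose
--     first letter equals the current character are tested with startswith."""
--     t = text.lower()
--     for i in range(len(t)):
--         for w in idx.get(t[i], []):
--             if t.startswith(w, i):
--                 return True
--     return False
--
--
-- def _is_glp1(gnrc_name: str, brnd_name: str) -> bool: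
--     """Check if a record is a GLP-1 drug."""
--     return _scan(_GEN_IDX, gnrc_name) or _scan(_BRAND_IDX, brnd_name)
-- ===== Notes on version B (the rewrite author's own statement) =====
-- stated objective: alternative
-- what changed: A's per-needle 'in' substring searches over strip/case-normalised copies are replaced by a single position scan per case-folded field driven by a first-character index (dict from initial letter to candidate names), so only names whose first letter matches the current character are tested with startswith.
import Mathlib
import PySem

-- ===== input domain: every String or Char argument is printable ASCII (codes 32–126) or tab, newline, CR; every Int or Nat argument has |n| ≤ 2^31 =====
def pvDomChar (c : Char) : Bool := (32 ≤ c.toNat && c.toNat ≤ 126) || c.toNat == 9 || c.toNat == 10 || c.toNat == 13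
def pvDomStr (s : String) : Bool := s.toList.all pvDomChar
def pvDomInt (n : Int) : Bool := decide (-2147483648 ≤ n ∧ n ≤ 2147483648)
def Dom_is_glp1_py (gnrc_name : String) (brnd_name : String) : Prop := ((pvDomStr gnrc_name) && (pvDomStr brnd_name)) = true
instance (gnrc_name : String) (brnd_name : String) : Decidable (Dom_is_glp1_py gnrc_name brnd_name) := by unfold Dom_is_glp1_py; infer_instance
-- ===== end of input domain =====

-- B replaces A's per-needle substring searches over strip/case-normalised copies by one position
-- scan per case-folded field, driven by a first-character index (dict from initial letter to the
-- candidate names), testing startswith only for the candidates of the current character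
-- (objective: alternative).

-- ===== PORT A =====
def glp1Generics : List String :=
  ["semaglutide", "tirzepatide", "liraglutide", "dulaglutide", "exenatide"]

def glp1BrandsUpper : List String :=
  ["OZEMPIC", "WEGOVY", "RYBELSUS", "MOUNJARO", "ZEPBOUND",
   "VICTOZA", "SAXENDA", "TRULICITY", "BYETTA", "BYDUREON"]

-- each 'for … : if … in …: return True' loop is the short-circuit scan List.any
def is_glp1_py (gnrc_name : String) (brnd_name : String) : Bool :=
  let gn := PySem.Str.lower (PySem.Str.strip gnrc_name)
  if glp1Generics.any (fun drug => PySem.Str.isIn drug gn) then true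
  else
    let bn := PySem.Str.upper (PySem.Str.strip brnd_name)
    if glp1BrandsUpper.any (fun brand => PySem.Str.isIn brand bn) then true
    else false

-- ===== PORT B =====
def glp1NamesGeneric : List String :=
  ["semaglutide", "tirzepatide", "liraglutide", "dulaglutide", "exenatide"]

def glp1NamesBrand : List String :=
  ["ozempic", "wegovy", "rybelsus", "mounjaro", "zepbound",
   "victoza", "saxenda", "trulicity", "byetta", "bydureon"]

-- idx[w[0]] = idx.get(w[0], []) + [w]; w[0] of the (nonempty) name literals is headD ' '
def indexByFirst (words : List String) : PySem.Dict Char (List String) :=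
  words.foldl (fun idx w => idx.modify (w.toList.headD ' ') [] (· ++ [w])) PySem.Dict.empty

def genIdx : PySem.Dict Char (List String) := indexByFirst glp1NamesGeneric
def brandIdx : PySem.Dict Char (List String) := indexByFirst glp1NamesBrand

-- for i in range(len(t)): t[i] is t.getD i ' ' (i is always in range, the default is never
-- used) and t.startswith(w, i) is startswith on the suffix t.drop i — both exact here
def scanIdx (idx : PySem.Dict Char (List String)) (text : String) : Bool :=
  let t := (PySem.Str.lower text).toList
  (List.range t.length).any (fun i =>
    (idx.getD (t.getD i ' ') []).any (fun w => PySem.Chars.startswith (t.drop i) w.toList))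

def is_glp1_py_alt (gnrc_name : String) (brnd_name : String) : Bool :=
  scanIdx genIdx gnrc_name || scanIdx brandIdx brnd_name

-- ===== PRECONDITION & SPEC =====
def Spec_is_glp1_py (gnrc_name : String) (brnd_name : String) (out : Bool) : Prop := out = is_glp1_py_alt gnrc_name brnd_name
instance (gnrc_name : String) (brnd_name : String) (out : Bool) : Decidable (Spec_is_glp1_py gnrc_name brnd_name out) := by unfold Spec_is_glp1_py; infer_instance

-- ===== CLAIM (what is proved, stated in full; the proofs are below) =====
def Claim_equal_is_glp1_py : Prop := ∀ (gnrc_name : String) (brnd_name : String), Dom_is_glp1_py gnrc_name brnd_name → Spec_is_glp1_py gnrc_name brnd_name (is_glp1_py gnrc_name brnd_name)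

-- ===== LEMMAS AND PROOFS =====

theorem char_eq_of_toNat (c d : Char) (h : c.toNat = d.toNat) : c = d := by
  apply Char.ext; exact UInt32.toNat_inj.mp h

theorem char_eq_iff_toNat (c d : Char) : c = d ↔ c.toNat = d.toNat :=
  ⟨fun h => by rw [h], char_eq_of_toNat c d⟩

theorem toNat_ofNat_valid (n : Nat) (h : n < 55296) : (Char.ofNat n).toNat = n := by
  unfold Char.ofNat
  rw [dif_pos (Or.inl h)]
  simp [Char.ofNatAux, Char.toNat]

theorem isupper_toNat (c : Char) : PySem.Chars.isupper c = true ↔ (65 ≤ c.toNat ∧ c.toNat ≤ 90) := by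
  simp only [PySem.Chars.isupper, Bool.and_eq_true, decide_eq_true_eq, Char.le_def,
    UInt32.le_iff_toNat_le, Char.toNat]
  exact Iff.rfl

theorem islower_toNat (c : Char) : PySem.Chars.islower c = true ↔ (97 ≤ c.toNat ∧ c.toNat ≤ 122) := by
  simp only [PySem.Chars.islower, Bool.and_eq_true, decide_eq_true_eq, Char.le_def,
    UInt32.le_iff_toNat_le, Char.toNat]
  exact Iff.rfl

theorem isspace_false_of_range (c : Char) (h1 : 65 ≤ c.toNat) (h2 : c.toNat ≤ 122) :
    PySem.Chars.isspace c = false := by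
  simp only [PySem.Chars.isspace]
  simp only [Bool.or_eq_false_iff, Bool.and_eq_false_iff, decide_eq_false_iff_not]
  omega

theorem isspace_lowerChar (c : Char) :
    PySem.Chars.isspace (PySem.Chars.lowerChar c) = PySem.Chars.isspace c := by
  unfold PySem.Chars.lowerChar
  by_cases h : PySem.Chars.isupper c = true
  · rw [if_pos h]
    obtain ⟨h1, h2⟩ := (isupper_toNat c).mp h
    rw [isspace_false_of_range _ (by rw [toNat_ofNat_valid _ (by omega)]; omega)
        (by rw [toNat_ofNat_valid _ (by omega)]; omega),
      isspace_false_of_range c (by omega) (by omega)]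
  · rw [if_neg h]

theorem isspace_upperChar (c : Char) :
    PySem.Chars.isspace (PySem.Chars.upperChar c) = PySem.Chars.isspace c := by
  unfold PySem.Chars.upperChar
  by_cases h : PySem.Chars.islower c = true
  · rw [if_pos h]
    obtain ⟨h1, h2⟩ := (islower_toNat c).mp h
    rw [isspace_false_of_range _ (by rw [toNat_ofNat_valid _ (by omega)]; omega)
        (by rw [toNat_ofNat_valid _ (by omega)]; omega),
      isspace_false_of_range c (by omega) (by omega)]
  · rw [if_neg h]

-- a character-wise case map f (lowerChar or upperChar) commutes with strip
theorem strip_map_comm (f : Char → Char)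
    (hf : ∀ c, PySem.Chars.isspace (f c) = PySem.Chars.isspace c) (l : List Char) :
    PySem.Chars.strip (l.map f) = (PySem.Chars.strip l).map f := by
  have hfun : (PySem.Chars.isspace ∘ f) = PySem.Chars.isspace := funext hf
  unfold PySem.Chars.strip PySem.Chars.lstrip PySem.Chars.rstrip
  rw [List.dropWhile_map, hfun, ← List.map_reverse, List.dropWhile_map, hfun, ← List.map_reverse]

theorem lower_strip (s : List Char) :
    PySem.Chars.lower (PySem.Chars.strip s) = PySem.Chars.strip (PySem.Chars.lower s) := by
  unfold PySem.Chars.lower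
  rw [strip_map_comm _ isspace_lowerChar]

theorem upper_strip (s : List Char) :
    PySem.Chars.upper (PySem.Chars.strip s) = PySem.Chars.strip (PySem.Chars.upper s) := by
  unfold PySem.Chars.upper
  rw [strip_map_comm _ isspace_upperChar]

-- a nonempty all-non-space needle ignores an all-space prefix
theorem infix_space_prefix (d w u : List Char) (hw : ∀ c ∈ w, PySem.Chars.isspace c = true)
    (hne : d ≠ []) (hns : ∀ c ∈ d, PySem.Chars.isspace c = false) :
    d <:+: (w ++ u) ↔ d <:+: u := by
  induction w with
  | nil => simp
  | cons a w ih =>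
    have hw' : ∀ c ∈ w, PySem.Chars.isspace c = true := fun c hc => hw c (List.mem_cons_of_mem a hc)
    constructor
    · intro h
      rcases (List.infix_cons_iff).mp h with hp | hi
      · exfalso
        cases d with
        | nil => exact hne rfl
        | cons x d' =>
          have hx : x = a := (List.cons_prefix_cons.mp hp).1
          have := hns x (List.mem_cons_self)
          rw [hx, hw a List.mem_cons_self] at this
          exact Bool.true_eq_false.mp this
      · exact (ih hw').mp hi
    · intro h
      exact List.infix_cons ((ih hw').mpr h)

-- stripping whitespace does not change occurrences of a nonempty all-non-space needle
theorem infix_strip (d t : List Char) (hne : d ≠ [])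
    (hns : ∀ c ∈ d, PySem.Chars.isspace c = false) :
    d <:+: PySem.Chars.strip t ↔ d <:+: t := by
  have lstep : ∀ u : List Char, d <:+: PySem.Chars.lstrip u ↔ d <:+: u := by
    intro u
    unfold PySem.Chars.lstrip
    conv_rhs => rw [← List.takeWhile_append_dropWhile (p := PySem.Chars.isspace) (l := u)]
    exact (infix_space_prefix d _ _ (fun c hc => List.mem_takeWhile_imp hc) hne hns).symm
  have rstep : ∀ u : List Char, d <:+: PySem.Chars.rstrip u ↔ d <:+: u := by
    intro u
    unfold PySem.Chars.rstrip
    rw [← List.reverse_infix (l₁ := d) (l₂ := _)]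
    have hne' : d.reverse ≠ [] := by simpa using hne
    have hns' : ∀ c ∈ d.reverse, PySem.Chars.isspace c = false := fun c hc =>
      hns c (List.mem_reverse.mp hc)
    calc d.reverse <:+: ((List.dropWhile PySem.Chars.isspace u.reverse).reverse).reverse
        ↔ d.reverse <:+: List.dropWhile PySem.Chars.isspace u.reverse := by
          rw [List.reverse_reverse]
      _ ↔ d.reverse <:+: u.reverse := by
          conv_rhs => rw [← List.takeWhile_append_dropWhile (p := PySem.Chars.isspace) (l := u.reverse)]
          exact (infix_space_prefix d.reverse _ _ (fun c hc => List.mem_takeWhile_imp hc) hne' hns').symm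
      _ ↔ d <:+: u := List.reverse_infix
  unfold PySem.Chars.strip
  rw [rstep, lstep]

-- for a lowercase letter ℓ: folding c down hits ℓ iff folding c up hits ℓ's uppercase
theorem lowerChar_eq_iff_upperChar (ℓ c : Char) (hℓ : PySem.Chars.islower ℓ = true) :
    PySem.Chars.lowerChar c = ℓ ↔ PySem.Chars.upperChar c = PySem.Chars.upperChar ℓ := by
  obtain ⟨hm1, hm2⟩ := (islower_toNat ℓ).mp hℓ
  have hℓup : ¬ PySem.Chars.isupper ℓ = true := by rw [isupper_toNat]; omega
  unfold PySem.Chars.lowerChar PySem.Chars.upperChar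
  rw [if_pos hℓ]
  by_cases hu : PySem.Chars.isupper c = true
  · obtain ⟨h1, h2⟩ := (isupper_toNat c).mp hu
    have hcl : ¬ PySem.Chars.islower c = true := by rw [islower_toNat]; omega
    rw [if_pos hu, if_neg hcl, char_eq_iff_toNat, char_eq_iff_toNat,
      toNat_ofNat_valid _ (by omega), toNat_ofNat_valid _ (by omega)]
    omega
  · rw [if_neg hu]
    by_cases hl : PySem.Chars.islower c = true
    · obtain ⟨h1, h2⟩ := (islower_toNat c).mp hl
      rw [if_pos hl, char_eq_iff_toNat, char_eq_iff_toNat,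
        toNat_ofNat_valid _ (by omega), toNat_ofNat_valid _ (by omega)]
      omega
    · rw [if_neg hl, char_eq_iff_toNat, char_eq_iff_toNat, toNat_ofNat_valid _ (by omega)]
      rw [isupper_toNat] at hu
      rw [islower_toNat] at hl
      omega

-- segment-wise version of the previous lemma, for an all-lowercase needle
theorem map_lower_eq_iff (d seg : List Char) (hd : ∀ c ∈ d, PySem.Chars.islower c = true) :
    seg.map PySem.Chars.lowerChar = d ↔
      seg.map PySem.Chars.upperChar = d.map PySem.Chars.upperChar := by
  induction seg generalizing d with
  | nil =>
    cases d with
    | nil => simp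
    | cons x d' => simp
  | cons c seg ih =>
    cases d with
    | nil => simp
    | cons x d' =>
      have hx : PySem.Chars.islower x = true := hd x List.mem_cons_self
      have hd' : ∀ c ∈ d', PySem.Chars.islower c = true := fun c hc =>
        hd c (List.mem_cons_of_mem x hc)
      simp only [List.map_cons, List.cons.injEq]
      rw [ih d' hd', lowerChar_eq_iff_upperChar x c hx]

-- the case mirror: an all-lowercase needle occurs in the lowercased text
-- iff its uppercased form occurs in the uppercased text
theorem infix_lower_iff_upper (d t : List Char) (hd : ∀ c ∈ d, PySem.Chars.islower c = true) :
    d <:+: PySem.Chars.lower t ↔ d.map PySem.Chars.upperChar <:+: PySem.Chars.upper t := by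
  unfold PySem.Chars.lower PySem.Chars.upper
  rw [List.infix_map_iff, List.infix_map_iff]
  constructor
  · rintro ⟨s, hs, hmap⟩
    exact ⟨s, hs, by rw [← (map_lower_eq_iff d s hd).mp hmap.symm]⟩
  · rintro ⟨s, hs, hmap⟩
    exact ⟨s, hs, ((map_lower_eq_iff d s hd).mpr hmap.symm).symm⟩

-- a generic needle: A's search in lower(strip(s)) equals a search in lower(s)
theorem gen_needle (d s : String) (hne : d.toList ≠ [])
    (hnsb : d.toList.all (fun c => PySem.Chars.isspace c = false) = true) :
    PySem.Str.isIn d (PySem.Str.lower (PySem.Str.strip s)) = PySem.Str.isIn d (PySem.Str.lower s) := by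
  have hns : ∀ c ∈ d.toList, PySem.Chars.isspace c = false := by
    simpa using List.all_eq_true.mp hnsb
  simp only [PySem.Str.isIn, PySem.Str.lower, PySem.Str.strip, String.toList_ofList]
  rw [lower_strip]
  rcases h : PySem.Chars.isIn d.toList (PySem.Chars.lower s.toList) with _ | _
  · rw [PySem.Chars.isIn_eq_false_iff] at h ⊢
    rw [infix_strip _ _ hne hns]
    exact h
  · rw [PySem.Chars.isIn_iff_infix] at h ⊢
    rw [infix_strip _ _ hne hns]
    exact h

-- a brand needle: A's search for the UPPER literal in upper(strip(s))
-- equals a search for the lowercase literal in lower(s)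
theorem brand_needle (D dl s : String)
    (hmap : D.toList = dl.toList.map PySem.Chars.upperChar)
    (hlowb : dl.toList.all (fun c => PySem.Chars.islower c) = true) (hne : dl.toList ≠ []) :
    PySem.Str.isIn D (PySem.Str.upper (PySem.Str.strip s)) = PySem.Str.isIn dl (PySem.Str.lower s) := by
  have hlow : ∀ c ∈ dl.toList, PySem.Chars.islower c = true := by
    simpa using List.all_eq_true.mp hlowb
  have hne' : D.toList ≠ [] := by rw [hmap]; simpa using hne
  have hns' : ∀ c ∈ D.toList, PySem.Chars.isspace c = false := by
    intro c hc
    rw [hmap] at hc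
    obtain ⟨c', hc', rfl⟩ := List.mem_map.mp hc
    obtain ⟨h1, h2⟩ := (islower_toNat c').mp (hlow c' hc')
    rw [isspace_upperChar]
    exact isspace_false_of_range c' (by omega) (by omega)
  simp only [PySem.Str.isIn, PySem.Str.lower, PySem.Str.upper, PySem.Str.strip, String.toList_ofList]
  rw [upper_strip]
  rcases h : PySem.Chars.isIn dl.toList (PySem.Chars.lower s.toList) with _ | _
  · rw [PySem.Chars.isIn_eq_false_iff] at h ⊢
    rw [infix_strip _ _ hne' hns', hmap, ← infix_lower_iff_upper _ _ hlow]
    exact h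
  · rw [PySem.Chars.isIn_iff_infix] at h ⊢
    rw [infix_strip _ _ hne' hns', hmap, ← infix_lower_iff_upper _ _ hlow]
    exact h

-- B's first-letter index holds, under character c, exactly the names starting with c
theorem bucket_eq (words : List String) (c : Char) :
    (indexByFirst words).getD c [] = words.filter (fun w => w.toList.headD ' ' == c) := by
  have hmap : indexByFirst words
      = ((words.map (fun w => (w.toList.headD ' ', w))).foldl
          (fun d p => d.modify p.1 [] (· ++ [p.2])) PySem.Dict.empty) := by
    rw [List.foldl_map]
    rfl
  rw [hmap, PySem.Dict.getD_foldl_modify_append, PySem.Dict.getD_empty,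
    List.filter_map, List.map_map]
  simp [Function.comp_def]

-- B's indexed position scan finds exactly the texts containing some name of the word list
theorem scan_eq (words : List String) (hne : ∀ w ∈ words, w.toList ≠ []) (tl : List Char) :
    ((List.range tl.length).any (fun i =>
      ((indexByFirst words).getD (tl.getD i ' ') []).any
        (fun w => PySem.Chars.startswith (tl.drop i) w.toList)))
    = words.any (fun w => PySem.Chars.isIn w.toList tl) := by
  rw [Bool.eq_iff_iff]
  simp only [List.any_eq_true, List.mem_range, bucket_eq, List.mem_filter,
    PySem.Chars.startswith_iff, PySem.Chars.isIn_iff_infix, beq_iff_eq]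
  constructor
  · rintro ⟨i, _, w, ⟨hw, _⟩, hpre⟩
    exact ⟨w, hw, hpre.isInfix.trans (List.drop_suffix i tl).isInfix⟩
  · rintro ⟨w, hw, s, u, hsu⟩
    rcases hwl : w.toList with _ | ⟨c, ws⟩
    · exact absurd hwl (hne w hw)
    have hdrop : tl.drop s.length = w.toList ++ u := by
      rw [← hsu, List.append_assoc, List.drop_left]
    have hlen : s.length < tl.length := by
      rw [← hsu]
      simp [List.length_append, hwl]
    have hget : tl.getD s.length ' ' = c := by
      rw [List.getD_eq_getElem?_getD, ← hsu, List.append_assoc,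
        List.getElem?_append_right (Nat.le_refl _), Nat.sub_self, hwl]
      rfl
    refine ⟨s.length, hlen, w, ⟨hw, ?_⟩, ?_⟩
    · rw [hget, hwl]; rfl
    · rw [hdrop]; exact List.prefix_append _ _

-- ===== VERDICT (by name: the statement is the Claim_ definition above) =====
set_option maxRecDepth 40000 in
theorem is_glp1_py_spec : Claim_equal_is_glp1_py := by
  intro g b _
  unfold Spec_is_glp1_py is_glp1_py is_glp1_py_alt scanIdx genIdx brandIdx
  simp only []
  rw [scan_eq glp1NamesGeneric (by decide) _, scan_eq glp1NamesBrand (by decide) _]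
  have hG : glp1Generics.any (fun drug => PySem.Str.isIn drug (PySem.Str.lower (PySem.Str.strip g)))
      = glp1NamesGeneric.any (fun w => PySem.Chars.isIn w.toList (PySem.Str.lower g).toList) := by
    simp only [glp1Generics, glp1NamesGeneric, List.any_cons, List.any_nil, Bool.or_false]
    rw [gen_needle "semaglutide" g (by decide) (by decide),
      gen_needle "tirzepatide" g (by decide) (by decide),
      gen_needle "liraglutide" g (by decide) (by decide),
      gen_needle "dulaglutide" g (by decide) (by decide),
      gen_needle "exenatide" g (by decide) (by decide)]
    simp
  have hB : glp1BrandsUpper.any (fun brand => PySem.Str.isIn brand (PySem.Str.upper (PySem.Str.strip b)))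
      = glp1NamesBrand.any (fun w => PySem.Chars.isIn w.toList (PySem.Str.lower b).toList) := by
    simp only [glp1BrandsUpper, glp1NamesBrand, List.any_cons, List.any_nil, Bool.or_false]
    rw [brand_needle "OZEMPIC" "ozempic" b (by decide) (by decide) (by decide),
      brand_needle "WEGOVY" "wegovy" b (by decide) (by decide) (by decide),
      brand_needle "RYBELSUS" "rybelsus" b (by decide) (by decide) (by decide),
      brand_needle "MOUNJARO" "mounjaro" b (by decide) (by decide) (by decide),
      brand_needle "ZEPBOUND" "zepbound" b (by decide) (by decide) (by decide),
      brand_needle "VICTOZA" "victoza" b (by decide) (by decide) (by decide),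
      brand_needle "SAXENDA" "saxenda" b (by decide) (by decide) (by decide),
      brand_needle "TRULICITY" "trulicity" b (by decide) (by decide) (by decide),
      brand_needle "BYETTA" "byetta" b (by decide) (by decide) (by decide),
      brand_needle "BYDUREON" "bydureon" b (by decide) (by decide) (by decide)]
    simp
  rw [hG, hB]
  cases glp1NamesGeneric.any (fun w => PySem.Chars.isIn w.toList (PySem.Str.lower g).toList) <;>
    cases glp1NamesBrand.any (fun w => PySem.Chars.isIn w.toList (PySem.Str.lower b).toList) <;> simp
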